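-- pv_equiv track=rewrite | github.com/macarenaescaratee-arch/asianliquiditybacktedter | strategy/mss_audit_report.py | _stratified_pick
-- ===== SOURCE A (Python) =====
-- def _stratified_pick(rows: list[dict], n: int, key_order: list[str]) -> list[dict]:
--     """Round-robin newest-first within each asset to spread examples."""
--     by_asset = {a: [] for a in key_order}
--     for r in sorted(rows, key=lambda x: x["session_date"], reverse=True):
--         by_asset[r["asset"]].append(r)
--     out: list[dict] = []
--     i = 0
--     while len(out) < n and any(by_asset[a] for a in key_order):
--         a = key_order[i % len(key_order)]
--         if by_asset[a]:
--             out.append(by_asset[a].pop(0))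
--         i += 1
--         if i > n * len(key_order) + 50:
--             break
--     return out
-- ===== SOURCE B (Python) =====
-- def _stratified_pick(rows: list[dict], n: int, key_order: list[str]) -> list[dict]:
--     """Round-robin newest-first by depth index over immutable per-asset buckets."""
--     by_asset = {a: [] for a in key_order}
--     for r in sorted(rows, key=lambda x: x["session_date"], reverse=True):
--         by_asset[r["asset"]].append(r)
--     maxlen = max((len(by_asset[a]) for a in key_order), default=0)
--     out: list[dict] = []
--     for depth in range(maxlen):
--         for a in key_order:
--             if len(out) >= n:
--                 return out
--             bucket = by_asset[a]
--             if depth < len(bucket):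
--                 out.append(bucket[depth])
--     return out
-- ===== Notes on version B (the rewrite author's own statement) =====
-- stated objective: alternative
-- what changed: Replaces the mutating while-loop round-robin (cycling i, pop(0) on per-asset queues, break counter) by a nested depth-round scan that indexes the r-th newest item of each asset's immutable bucket and returns once n items are collected.
import Mathlib
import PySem

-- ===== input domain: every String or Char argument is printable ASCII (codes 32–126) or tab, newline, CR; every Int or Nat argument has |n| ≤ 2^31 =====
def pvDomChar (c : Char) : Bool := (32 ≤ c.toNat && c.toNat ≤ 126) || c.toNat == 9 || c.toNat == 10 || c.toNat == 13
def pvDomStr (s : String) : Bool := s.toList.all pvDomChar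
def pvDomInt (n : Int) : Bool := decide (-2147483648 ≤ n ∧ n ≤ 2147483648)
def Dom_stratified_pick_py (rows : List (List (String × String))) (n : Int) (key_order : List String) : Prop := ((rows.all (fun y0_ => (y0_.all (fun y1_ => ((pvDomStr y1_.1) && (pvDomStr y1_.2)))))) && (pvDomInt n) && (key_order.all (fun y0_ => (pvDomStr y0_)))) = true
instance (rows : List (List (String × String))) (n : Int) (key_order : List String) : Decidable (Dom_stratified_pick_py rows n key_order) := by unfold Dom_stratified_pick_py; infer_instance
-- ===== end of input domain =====

-- B replaces A's mutating pop(0) round-robin cycle by a depth-indexed nested scan of immutable buckets (alternative decomposition, same cost class).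

-- ===== PORT A =====
-- r[k] for a row dict (first match); Pre_ guarantees the key is present where A looks it up
def pvRowGet (r : List (String × String)) (k : String) : String :=
  (PySem.Dict.mk r).getD k ""

-- shared front of both Pythons: by_asset = {a: [] for a in key_order}; then append rows sorted by session_date, newest first
def pvBuckets (rows : List (List (String × String))) (key_order : List String) :
    PySem.Dict String (List (List (String × String))) :=
  let d0 := key_order.foldl (fun d a => d.insert a []) PySem.Dict.empty
  (PySem.List.sorted rows (fun x => pvRowGet x "session_date") true).foldl
    (fun d r => d.modify (pvRowGet r "asset") [] (fun l => l ++ [r])) d0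

-- the while loop of A, fuel-counted; the break makes i > n*L+50 impossible while the guard holds (proved below)
def pvALoop (d : PySem.Dict String (List (List (String × String)))) (ks : List String) (n : Int)
    (out : List (List (String × String))) (i : Nat) : Nat → List (List (String × String))
  | 0 => out
  | fuel + 1 =>
    if ((out.length : Int) < n && ks.any (fun a => !(d.getD a []).isEmpty)) then
      match d.getD (ks.getD (i % ks.length) "") [] with
      | [] =>
          if ((i : Int) + 1) > n * ks.length + 50 then out
          else pvALoop d ks n out (i + 1) fuel
      | x :: r =>
          if ((i : Int) + 1) > n * ks.length + 50 then out ++ [x]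
          else pvALoop (d.insert (ks.getD (i % ks.length) "") r) ks n (out ++ [x]) (i + 1) fuel
    else out

def stratified_pick_py (rows : List (List (String × String))) (n : Int) (key_order : List String) : List (List (String × String)) :=
  pvALoop (pvBuckets rows key_order) key_order n [] 0 (n * key_order.length + 52).toNat

-- ===== PORT B =====
-- inner for-loop over key_order at one depth; Sum.inl = early 'return out', Sum.inr = fall through
def pvBInner (d : PySem.Dict String (List (List (String × String)))) (n : Int) (depth : Nat) :
    List String → List (List (String × String)) →
    (List (List (String × String))) ⊕ (List (List (String × String)))
  | [], out => Sum.inr out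
  | a :: ks, out =>
    if n ≤ (out.length : Int) then Sum.inl out
    else
      if depth < (d.getD a []).length then pvBInner d n depth ks (out ++ [(d.getD a []).getD depth []])
      else pvBInner d n depth ks out

-- outer for-loop over range(maxlen)
def pvBOuter (d : PySem.Dict String (List (List (String × String)))) (n : Int) (ks : List String) :
    List Nat → List (List (String × String)) → List (List (String × String))
  | [], out => out
  | t :: ts, out =>
    match pvBInner d n t ks out with
    | Sum.inl o => o
    | Sum.inr o => pvBOuter d n ks ts o

def stratified_pick_py_alt (rows : List (List (String × String))) (n : Int) (key_order : List String) : List (List (String × String)) :=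
  let d := pvBuckets rows key_order
  let maxlen := key_order.foldl (fun m a => max m (d.getD a []).length) 0
  pvBOuter d n key_order (List.range maxlen) []

-- ===== PRECONDITION & SPEC =====
-- Pre_ excludes inputs where A raises KeyError (a row missing "session_date", or an asset not in key_order)
-- and key_order lists with duplicate entries when they can matter (rows nonempty and n > 0): there the dict
-- comprehension collapses duplicates into one queue, so A gives a duplicated asset several picks per round —
-- an accidental duplicate-key artefact no caller would specify (with no rows, or n ≤ 0, both return []).
def Pre_stratified_pick_py (rows : List (List (String × String))) (n : Int) (key_order : List String) : Prop :=
  (key_order.Nodup ∨ rows = [] ∨ n ≤ 0) ∧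
  ∀ r ∈ rows, ((PySem.Dict.mk r).get? "session_date").isSome = true ∧
    ∃ a ∈ key_order, (PySem.Dict.mk r).get? "asset" = some a
instance (rows : List (List (String × String))) (n : Int) (key_order : List String) : Decidable (Pre_stratified_pick_py rows n key_order) := by unfold Pre_stratified_pick_py; infer_instance

def pvWitness_stratified_pick_py : (List (List (String × String))) × Int × List String :=
  ([[("session_date", "2"), ("asset", "x")], [("session_date", "1"), ("asset", "y")]], 3, ["x", "y"])

def Spec_stratified_pick_py (rows : List (List (String × String))) (n : Int) (key_order : List String) (out : List (List (String × String))) : Prop := out = stratified_pick_py_alt rows n key_order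
instance (rows : List (List (String × String))) (n : Int) (key_order : List String) (out : List (List (String × String))) : Decidable (Spec_stratified_pick_py rows n key_order out) := by unfold Spec_stratified_pick_py; infer_instance

-- ===== CLAIM (what is proved, stated in full; the proofs are below) =====
def Claim_equal_stratified_pick_py : Prop := ∀ (rows : List (List (String × String))) (n : Int) (key_order : List String), Dom_stratified_pick_py rows n key_order → Pre_stratified_pick_py rows n key_order → Spec_stratified_pick_py rows n key_order (stratified_pick_py rows n key_order)

-- ===== LEMMAS AND PROOFS =====

theorem pvFindIdx_append {α : Type} (p : α → Bool) (bs ys : List α) (h : bs.any p = true) :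
    (bs ++ ys).findIdx p = bs.findIdx p := by
  induction bs with
  | nil => simp at h
  | cons b bs ih =>
    by_cases hb : p b
    · simp [List.findIdx_cons, hb]
    · simp only [List.any_cons, hb, Bool.false_or] at h
      simp [List.findIdx_cons, hb, ih h]

def pvRR {α : Type} : List (List α) → List α
  | [] => []
  | [] :: bs =>
      if bs.all List.isEmpty then [] else pvRR (bs ++ [([] : List α)])
  | (x :: r) :: bs => x :: pvRR (bs ++ [r])
termination_by bs => (((bs.map List.length).sum : Nat), bs.findIdx (fun b => !b.isEmpty))
decreasing_by
  · apply Prod.Lex.right'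
    · simp
    · have hae : ¬ (bs.all List.isEmpty = true) := by assumption
      have hany : bs.any (fun b => !b.isEmpty) = true := by
        simp only [List.all_eq_true, not_forall] at hae
        rcases hae with ⟨b, hb, hne⟩
        simp only [List.any_eq_true]
        exact ⟨b, hb, by simp at hne ⊢; simp [hne]⟩
      rw [pvFindIdx_append _ _ _ hany]
      simp [List.findIdx_cons]
  · apply Prod.Lex.left
    simp
    omega

theorem pvRR_nil {α : Type} (bs : List (List α)) (h : ∀ b ∈ bs, b = []) : pvRR bs = [] := by
  match bs with
  | [] => rw [pvRR]
  | [] :: bs' =>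
    rw [pvRR]
    simp only [List.all_eq_true]
    rw [if_pos (fun b hb => by simp [h b (by simp [hb])])]
  | (x :: r) :: bs' => exact absurd (h (x :: r) (by exact List.mem_cons_self)) (by simp)

theorem pvRR_cons_cons {α : Type} (x : α) (r : List α) (bs : List (List α)) :
    pvRR ((x :: r) :: bs) = x :: pvRR (bs ++ [r]) := by rw [pvRR]

theorem pvRR_nil_cons {α : Type} (bs : List (List α)) (h : ¬ (bs.all List.isEmpty = true)) :
    pvRR ([] :: bs) = pvRR (bs ++ [([] : List α)]) := by rw [pvRR, if_neg h]

theorem pvDivMod (q r L : Nat) (h : r < L) : (L * q + r) / L = q ∧ (L * q + r) % L = r := by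
  constructor
  · rw [Nat.mul_add_div (by omega)]
    rw [Nat.div_eq_of_lt h]; omega
  · rw [Nat.mul_add_mod]
    exact Nat.mod_eq_of_lt h

theorem pvRotSucc {α : Type} (ks : List String) (g : String → List α) (s : Nat) (hs : s < ks.length) :
    (ks.drop (s+1)).map g ++ (ks.take (s+1)).map g
    = ((ks.drop (s+1)).map g ++ (ks.take s).map g) ++ [g ks[s]] := by
  have h1 : ks.take (s+1) = ks.take s ++ [ks[s]] := by
    rw [List.take_add_one, List.getElem?_eq_getElem hs]; simp
  rw [h1, List.map_append, ← List.append_assoc]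
  simp only [List.map_cons, List.map_nil]

theorem pvKsSplit {α : Type} (ks : List α) (s : Nat) (hs : s < ks.length) :
    ks = ks.take s ++ ks[s] :: ks.drop (s+1) := by
  conv_lhs => rw [← List.take_append_drop s ks]
  rw [List.drop_eq_getElem_cons hs]

theorem pvALoop_eq (ks : List String) (n : Int) (hne : ks ≠ []) (hnd : ks.Nodup) :
    ∀ (fuel : Nat) (d : PySem.Dict String (List (List (String × String))))
      (out : List (List (String × String))) (i : Nat),
      (n * ks.length + 52).toNat ≤ fuel + i →
      i / ks.length ≤ out.length →
      (i / ks.length = out.length → ∀ a ∈ ks.take (i % ks.length), d.getD a [] = []) →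
      pvALoop d ks n out i fuel =
        out ++ (pvRR ((ks.drop (i % ks.length)).map (fun a => d.getD a []) ++
                      (ks.take (i % ks.length)).map (fun a => d.getD a []))).take (n.toNat - out.length) := by
  intro fuel
  induction fuel with
  | zero =>
    intro d out i hfi hq hcl
    rw [pvALoop]
    by_cases hN : n.toNat ≤ out.length
    · rw [Nat.sub_eq_zero_of_le hN]; simp
    · exfalso
      push_neg at hN
      have hL : 0 < ks.length := List.length_pos_of_ne_nil hne
      have hs : i % ks.length < ks.length := Nat.mod_lt _ hL
      have hi : ks.length * (i / ks.length) + i % ks.length = i := Nat.div_add_mod i ks.length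
      have h2 : i / ks.length + 1 ≤ n.toNat := by omega
      have h1 : i < ks.length * n.toNat := by
        calc i < ks.length * (i / ks.length) + ks.length := by omega
        _ = ks.length * (i / ks.length + 1) := by ring
        _ ≤ ks.length * n.toNat := Nat.mul_le_mul_left _ h2
      have e : n * (ks.length : Int) + 52 = ((n.toNat * ks.length + 52 : Nat) : Int) := by
        push_cast [Int.toNat_of_nonneg (show (0:Int) ≤ n by omega)]
        ring
      rw [e, Int.toNat_natCast] at hfi
      rw [Nat.mul_comm] at h1
      omega
  | succ fuel ih =>
    intro d out i hfi hq hcl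
    have hL : 0 < ks.length := List.length_pos_of_ne_nil hne
    have hs : i % ks.length < ks.length := Nat.mod_lt _ hL
    have hi : ks.length * (i / ks.length) + i % ks.length = i := Nat.div_add_mod i ks.length
    rw [pvALoop]
    by_cases hc : ((out.length : Int) < n && ks.any (fun a => !(d.getD a []).isEmpty)) = true
    case neg =>
      rw [if_neg hc]
      rw [Bool.and_eq_true, not_and_or] at hc
      rcases hc with hc | hc
      · have hN : n.toNat ≤ out.length := by simp at hc; omega
        rw [Nat.sub_eq_zero_of_le hN]; simp
      · have hall : ∀ a ∈ ks, d.getD a [] = [] := by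
          intro a ha
          by_contra hne'
          apply hc
          simp only [List.any_eq_true]
          exact ⟨a, ha, by simpa [List.isEmpty_iff] using hne'⟩
        have hrr : pvRR ((ks.drop (i % ks.length)).map (fun a => d.getD a []) ++
                      (ks.take (i % ks.length)).map (fun a => d.getD a [])) = [] := by
          apply pvRR_nil
          intro b hb
          rcases List.mem_append.mp hb with hb | hb <;>
            rcases List.mem_map.mp hb with ⟨a, ha, rfl⟩
          · exact hall a (List.mem_of_mem_drop ha)
          · exact hall a (List.mem_of_mem_take ha)
        rw [hrr]
        simp
    case pos =>
      rw [if_pos hc]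
      rw [Bool.and_eq_true] at hc
      obtain ⟨hout, hany⟩ := hc
      have houtN : out.length < n.toNat := by simp at hout; omega
      have hn1 : (1:Int) ≤ n := by omega
      have h2 : i / ks.length + 1 ≤ n.toNat := by omega
      have h1 : i + 1 ≤ ks.length * n.toNat := by
        calc i + 1 ≤ ks.length * (i / ks.length) + ks.length := by omega
        _ = ks.length * (i / ks.length + 1) := by ring
        _ ≤ ks.length * n.toNat := Nat.mul_le_mul_left _ h2
      have hcast : ((ks.length * n.toNat : Nat) : Int) = n * ks.length := by
        push_cast; rw [Int.toNat_of_nonneg (by omega)]; ring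
      have h3 : (i:Int) + 1 ≤ n * ks.length := by
        rw [← hcast]; exact_mod_cast h1
      have hbrk : ¬ ((n * (ks.length:Int) + 50) < (i:Int) + 1) := by
        intro hlt
        have := lt_of_le_of_lt h3 (by linarith)
        linarith
      have hgd : ks.getD (i % ks.length) "" = ks[i % ks.length] := List.getD_eq_getElem ks "" hs
      have hdrop : ks.drop (i % ks.length) = ks[i % ks.length] :: ks.drop (i % ks.length + 1) :=
        List.drop_eq_getElem_cons hs
      have hanyx : ∃ a ∈ ks, d.getD a [] ≠ [] := by
        simp only [List.any_eq_true] at hany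
        rcases hany with ⟨a, ha, hx⟩
        exact ⟨a, ha, by simpa [List.isEmpty_iff] using hx⟩
      split
      next hgb =>
        rw [if_neg hbrk]
        have hgb' : d.getD ks[i % ks.length] [] = [] := by rw [← hgd]; exact hgb
        have hrest : ¬ (((ks.drop (i % ks.length + 1)).map (fun a => d.getD a []) ++
            (ks.take (i % ks.length)).map (fun a => d.getD a [])).all List.isEmpty = true) := by
          intro hall
          simp only [List.all_eq_true] at hall
          rcases hanyx with ⟨a, ha, hxa⟩
          rw [pvKsSplit ks (i % ks.length) hs] at ha
          apply hxa
          rcases List.mem_append.mp ha with ha | ha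
          · exact List.isEmpty_iff.mp
              (hall _ (List.mem_append_right _ (List.mem_map_of_mem ha)))
          · rcases List.mem_cons.mp ha with rfl | ha
            · exact hgb'
            · exact List.isEmpty_iff.mp
                (hall _ (List.mem_append_left _ (List.mem_map_of_mem ha)))
        by_cases hsl : i % ks.length + 1 < ks.length
        · have hdm : (i+1) / ks.length = i / ks.length ∧ (i+1) % ks.length = i % ks.length + 1 := by
            have hdm0 := pvDivMod (i / ks.length) (i % ks.length + 1) ks.length hsl
            have hx : ks.length * (i / ks.length) + (i % ks.length + 1) = i + 1 := by omega
            rw [hx] at hdm0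
            exact hdm0
          have hC : (i+1) / ks.length = out.length →
              ∀ a ∈ ks.take ((i+1) % ks.length), d.getD a [] = [] := by
            intro hqe a ha
            rw [hdm.2] at ha
            rw [hdm.1] at hqe
            have htk : ks.take (i % ks.length + 1) =
                ks.take (i % ks.length) ++ [ks[i % ks.length]] := by
              rw [List.take_add_one, List.getElem?_eq_getElem hs]; simp
            rw [htk] at ha
            rcases List.mem_append.mp ha with ha | ha
            · exact hcl hqe a ha
            · rw [List.mem_singleton.mp ha]; exact hgb'
          rw [ih d out (i+1) (by omega) (by rw [hdm.1]; exact hq) hC]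
          have hpv : pvRR ((ks.drop ((i+1) % ks.length)).map (fun a => d.getD a []) ++
                (ks.take ((i+1) % ks.length)).map (fun a => d.getD a []))
              = pvRR ((ks.drop (i % ks.length)).map (fun a => d.getD a []) ++
                (ks.take (i % ks.length)).map (fun a => d.getD a [])) := by
            rw [hdm.2, pvRotSucc ks (fun a => d.getD a []) (i % ks.length) hs]
            conv_rhs => rw [hdrop]
            simp only [List.map_cons, List.cons_append]
            rw [hgb']
            rw [pvRR_nil_cons _ hrest]
          rw [hpv]
        · have hseq : i % ks.length + 1 = ks.length := by omega
          have hdm : (i+1) / ks.length = i / ks.length + 1 ∧ (i+1) % ks.length = 0 := by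
            have hdm0 := pvDivMod (i / ks.length + 1) 0 ks.length hL
            have hx : ks.length * (i / ks.length + 1) + 0 = i + 1 := by
              rw [Nat.mul_add, Nat.mul_one]; omega
            rw [hx] at hdm0
            exact hdm0
          have hdropL : ks.drop (i % ks.length + 1) = [] := by
            rw [hseq]; exact List.drop_length
          have hq' : i / ks.length + 1 ≤ out.length := by
            rcases Nat.lt_or_ge (i / ks.length) out.length with h | h
            · omega
            · exfalso
              have hqe : i / ks.length = out.length := by omega
              rcases hanyx with ⟨a, ha, hxa⟩
              rw [pvKsSplit ks (i % ks.length) hs] at ha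
              rcases List.mem_append.mp ha with ha | ha
              · exact hxa (hcl hqe a ha)
              · rcases List.mem_cons.mp ha with rfl | ha
                · exact hxa hgb'
                · rw [hdropL] at ha; simp at ha
          have hC : (i+1) / ks.length = out.length →
              ∀ a ∈ ks.take ((i+1) % ks.length), d.getD a [] = [] := by
            intro _ a ha
            rw [hdm.2] at ha
            simp at ha
          rw [ih d out (i+1) (by omega) (by rw [hdm.1]; exact hq') hC]
          have hpv : pvRR ((ks.drop ((i+1) % ks.length)).map (fun a => d.getD a []) ++
                (ks.take ((i+1) % ks.length)).map (fun a => d.getD a []))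
              = pvRR ((ks.drop (i % ks.length)).map (fun a => d.getD a []) ++
                (ks.take (i % ks.length)).map (fun a => d.getD a [])) := by
            have h5 := pvRotSucc ks (fun a => d.getD a []) (i % ks.length) hs
            rw [hseq] at h5
            rw [List.drop_length, List.take_length] at h5
            simp only [List.map_nil, List.nil_append] at h5
            rw [hgb'] at h5
            rw [hdropL] at hrest
            simp only [List.map_nil, List.nil_append] at hrest
            rw [hdm.2]
            simp only [List.drop_zero, List.take_zero, List.map_nil, List.append_nil]
            conv_rhs => rw [hdrop]
            simp only [List.map_cons, List.cons_append]
            rw [hgb', hdropL]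
            simp only [List.map_nil, List.nil_append]
            rw [pvRR_nil_cons _ hrest]
            rw [h5]
          rw [hpv]
      next x r hgb =>
        rw [if_neg hbrk]
        have hgb' : d.getD ks[i % ks.length] [] = x :: r := by rw [← hgd]; exact hgb
        have hnd' : (ks.take (i % ks.length) ++ ks[i % ks.length] :: ks.drop (i % ks.length + 1)).Nodup := by
          rw [← pvKsSplit ks (i % ks.length) hs]; exact hnd
        rcases List.nodup_append.mp hnd' with ⟨nd1, nd2, hdisj⟩
        have hnot1 : ks[i % ks.length] ∉ ks.take (i % ks.length) := by
          intro hmem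
          exact hdisj _ hmem _ List.mem_cons_self rfl
        have hnot2 : ks[i % ks.length] ∉ ks.drop (i % ks.length + 1) := (List.nodup_cons.mp nd2).1
        have hmape : ∀ (l : List String), ks[i % ks.length] ∉ l →
            l.map (fun a => (d.insert (ks.getD (i % ks.length) "") r).getD a []) =
            l.map (fun a => d.getD a []) := by
          intro l hl
          apply List.map_congr_left
          intro a ha
          apply PySem.Dict.getD_insert_of_ne
          rw [hgd]
          exact fun he => hl (he ▸ ha)
        have hself : (d.insert (ks.getD (i % ks.length) "") r).getD ks[i % ks.length] [] = r := by
          rw [← hgd]; exact PySem.Dict.getD_insert_self d (ks.getD (i % ks.length) "") r []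
        have hk : n.toNat - out.length = (n.toNat - (out.length + 1)) + 1 := by omega
        by_cases hsl : i % ks.length + 1 < ks.length
        · have hdm : (i+1) / ks.length = i / ks.length ∧ (i+1) % ks.length = i % ks.length + 1 := by
            have hdm0 := pvDivMod (i / ks.length) (i % ks.length + 1) ks.length hsl
            have hx : ks.length * (i / ks.length) + (i % ks.length + 1) = i + 1 := by omega
            rw [hx] at hdm0
            exact hdm0
          have hB : (i+1) / ks.length ≤ (out ++ [x]).length := by
            rw [hdm.1]; simp; omega
          have hC : (i+1) / ks.length = (out ++ [x]).length →
              ∀ a ∈ ks.take ((i+1) % ks.length),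
                (d.insert (ks.getD (i % ks.length) "") r).getD a [] = [] := by
            intro hqe
            rw [hdm.1] at hqe
            simp at hqe
            omega
          rw [ih (d.insert (ks.getD (i % ks.length) "") r) (out ++ [x]) (i+1) (by omega) hB hC]
          rw [hdm.2, pvRotSucc ks (fun a => (d.insert (ks.getD (i % ks.length) "") r).getD a []) (i % ks.length) hs]
          rw [hmape _ hnot2, hmape _ hnot1, hself]
          conv_rhs => rw [hdrop]
          simp only [List.map_cons, List.cons_append]
          rw [hgb', pvRR_cons_cons]
          rw [hk, List.take_succ_cons]
          simp only [List.length_append, List.length_cons, List.length_nil,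
            List.append_assoc, List.singleton_append]
        · have hseq : i % ks.length + 1 = ks.length := by omega
          have hdm : (i+1) / ks.length = i / ks.length + 1 ∧ (i+1) % ks.length = 0 := by
            have hdm0 := pvDivMod (i / ks.length + 1) 0 ks.length hL
            have hx : ks.length * (i / ks.length + 1) + 0 = i + 1 := by
              rw [Nat.mul_add, Nat.mul_one]; omega
            rw [hx] at hdm0
            exact hdm0
          have hdropL : ks.drop (i % ks.length + 1) = [] := by
            rw [hseq]; exact List.drop_length
          have hB : (i+1) / ks.length ≤ (out ++ [x]).length := by
            rw [hdm.1]; simp; omega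
          have hC : (i+1) / ks.length = (out ++ [x]).length →
              ∀ a ∈ ks.take ((i+1) % ks.length),
                (d.insert (ks.getD (i % ks.length) "") r).getD a [] = [] := by
            intro _ a ha
            rw [hdm.2] at ha
            simp at ha
          rw [ih (d.insert (ks.getD (i % ks.length) "") r) (out ++ [x]) (i+1) (by omega) hB hC]
          have h5 := pvRotSucc ks (fun a => (d.insert (ks.getD (i % ks.length) "") r).getD a []) (i % ks.length) hs
          rw [hseq] at h5
          rw [List.drop_length, List.take_length] at h5
          simp only [List.map_nil, List.nil_append] at h5
          rw [hmape _ hnot1, hself] at h5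
          rw [hdm.2]
          simp only [List.drop_zero, List.take_zero, List.map_nil, List.append_nil]
          rw [h5]
          conv_rhs => rw [hdrop]
          simp only [List.map_cons, List.cons_append]
          rw [hgb', pvRR_cons_cons]
          rw [hdropL]
          simp only [List.map_nil, List.nil_append]
          rw [hk, List.take_succ_cons]
          simp only [List.length_append, List.length_cons, List.length_nil,
            List.append_assoc, List.singleton_append]

theorem pvBOuter_nil (d : PySem.Dict String (List (List (String × String)))) (n : Int)
    (ks : List String) (out : List (List (String × String))) :
    pvBOuter d n ks [] out = out := rfl

theorem pvBOuter_cons (d : PySem.Dict String (List (List (String × String)))) (n : Int)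
    (ks : List String) (t : Nat) (ts : List Nat) (out : List (List (String × String))) :
    pvBOuter d n ks (t :: ts) out =
      match pvBInner d n t ks out with
      | Sum.inl o => o
      | Sum.inr o => pvBOuter d n ks ts o := rfl

theorem pvRR_nil_cons_all {α : Type} (bs : List (List α)) (h : bs.all List.isEmpty = true) :
    pvRR ([] :: bs) = [] := by rw [pvRR, if_pos h]

theorem pvB_eq (d : PySem.Dict String (List (List (String × String)))) (ks : List String) (n : Int)
    (M : Nat) (hM : ∀ a ∈ ks, (d.getD a []).length ≤ M) :
    ∀ (k : Nat) (t : Nat) (pre suf : List String) (out : List (List (String × String))),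
      (M - t) * (ks.length + 1) + suf.length ≤ k →
      ks = pre ++ suf → t < M →
      (match pvBInner d n t suf out with
       | Sum.inl o => o
       | Sum.inr o => pvBOuter d n ks (List.range' (t+1) (M - (t+1))) o)
      = out ++ (pvRR (suf.map (fun a => (d.getD a []).drop t) ++
                      pre.map (fun a => (d.getD a []).drop (t+1)))).take (n.toNat - out.length) := by
  intro k
  induction k with
  | zero =>
    intro t pre suf out hk hks ht
    exfalso
    have h0 : (M - t) * (ks.length + 1) = 0 := by omega
    rcases Nat.mul_eq_zero.mp h0 with h | h <;> omega
  | succ k ih =>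
    intro t pre suf out hk hks ht
    match suf with
    | [] =>
      show pvBOuter d n ks (List.range' (t+1) (M - (t+1))) out = _
      by_cases ht1 : t + 1 < M
      · have hpre : pre = ks := by simpa using hks.symm
        have hr : M - (t+1) = (M - (t+1+1)) + 1 := by omega
        rw [hr, List.range'_succ, pvBOuter_cons]
        have hmeas : (M - (t+1)) * (ks.length + 1) + ks.length ≤ k := by
          have hmt : M - t = (M - (t+1)) + 1 := by omega
          rw [hmt] at hk
          have : ((M - (t+1)) + 1) * (ks.length + 1) =
              (M - (t+1)) * (ks.length + 1) + ks.length + 1 := by ring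
          omega
        have := ih (t+1) [] ks out (by simpa using hmeas) (by simp) ht1
        simp only [List.nil_append, List.map_nil, List.append_nil] at this ⊢
        rw [hpre]
        exact this
      · have htM : t + 1 = M := by omega
        have hr : M - (t+1) = 0 := by omega
        rw [hr, List.range'_zero, pvBOuter_nil]
        have hrr : pvRR (List.map (fun a => (d.getD a []).drop (t+1)) pre) = [] := by
          apply pvRR_nil
          intro b hb
          rcases List.mem_map.mp hb with ⟨a, ha, rfl⟩
          apply List.drop_eq_nil_of_le
          rw [htM]
          exact hM a (by rw [hks]; exact List.mem_append_left _ ha)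
        simp only [List.map_nil, List.nil_append]
        rw [hrr]
        simp
    | a :: suf' =>
      rw [pvBInner]
      by_cases hno : n ≤ (out.length : Int)
      · rw [if_pos hno]
        have hN : n.toNat - out.length = 0 := by omega
        rw [hN]
        simp
      · rw [if_neg hno]
        have houtN : out.length < n.toNat := by omega
        have hks' : ks = (pre ++ [a]) ++ suf' := by rw [hks]; simp
        by_cases hlen : t < (d.getD a []).length
        · rw [if_pos hlen]
          have hrec := ih t (pre ++ [a]) suf' (out ++ [(d.getD a []).getD t []])
            (by simp at hk ⊢; omega) hks' ht
          rw [hrec]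
          simp only [List.map_cons, List.cons_append, List.map_append]
          rw [List.drop_eq_getElem_cons hlen]
          rw [pvRR_cons_cons]
          have hk2 : n.toNat - out.length = (n.toNat - (out.length + 1)) + 1 := by omega
          rw [hk2, List.take_succ_cons]
          rw [List.getD_eq_getElem _ _ hlen]
          simp only [List.length_append, List.length_cons, List.length_nil,
            List.append_assoc, List.singleton_append, List.map_nil]
        · rw [if_neg hlen]
          have hdnil : (d.getD a []).drop t = [] :=
            List.drop_eq_nil_of_le (by omega)
          have hdnil1 : (d.getD a []).drop (t+1) = [] :=
            List.drop_eq_nil_of_le (by omega)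
          have hrec := ih t (pre ++ [a]) suf' out (by simp at hk ⊢; omega) hks' ht
          rw [hrec]
          simp only [List.map_cons, List.cons_append, List.map_append, List.map_nil,
            hdnil, hdnil1]
          by_cases hall : ((List.map (fun a => (d.getD a []).drop t) suf' ++
              List.map (fun a => (d.getD a []).drop (t+1)) pre).all List.isEmpty = true)
          · rw [pvRR_nil_cons_all _ hall]
            have : pvRR (List.map (fun a => (d.getD a []).drop t) suf' ++
                (List.map (fun a => (d.getD a []).drop (t+1)) pre ++ [[]])) = [] := by
              apply pvRR_nil
              intro b hb
              simp only [List.all_eq_true] at hall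
              simp only [List.mem_append, List.mem_singleton] at hb
              rcases hb with hb | hb | hb
              · exact List.isEmpty_iff.mp (hall b (List.mem_append_left _ hb))
              · exact List.isEmpty_iff.mp (hall b (List.mem_append_right _ hb))
              · exact hb
            rw [this]
          · rw [pvRR_nil_cons _ hall]
            simp only [List.append_assoc]

theorem pvD0Empty (ks : List String) :
    ∀ (d : PySem.Dict String (List (List (String × String)))),
      (∀ a, d.getD a [] = []) →
      ∀ a, (ks.foldl (fun d a => d.insert a ([] : List (List (String × String)))) d).getD a [] = [] := by
  induction ks with
  | nil => intro d h a; exact h a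
  | cons k ks ih =>
    intro d h a
    apply ih
    intro b
    rw [PySem.Dict.getD_insert]
    split <;> simp [h]

theorem pvBucketsEmptyRows (key_order : List String) :
    ∀ a, (pvBuckets [] key_order).getD a [] = [] := by
  intro a
  unfold pvBuckets
  rw [show PySem.List.sorted ([] : List (List (String × String)))
    (fun x => pvRowGet x "session_date") true = [] from rfl]
  rw [List.foldl_nil]
  exact pvD0Empty key_order PySem.Dict.empty (fun b => by simp [PySem.Dict.getD_empty]) a

theorem pvMaxlenEmptyRows (key_order : List String) :
    key_order.foldl (fun m a => max m ((pvBuckets [] key_order).getD a []).length) 0 = 0 := by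
  have h := PySem.List.foldl_congr_mem
    (l := key_order)
    (f := fun m a => max m ((pvBuckets [] key_order).getD a []).length)
    (g := fun m _ => m) (init := 0)
    (by intro acc a _; simp only []; rw [pvBucketsEmptyRows key_order a]; simp)
  rw [h]
  exact PySem.List.foldl_ignore _ _

theorem pvBOuter_nonpos (d : PySem.Dict String (List (List (String × String))))
    (ks : List String) (n : Int) (hn : n ≤ 0) :
    ∀ ts, pvBOuter d n ks ts [] = [] := by
  intro ts
  induction ts with
  | nil => rfl
  | cons t ts ih =>
    rw [pvBOuter_cons]
    cases ks with
    | nil => simpa [pvBInner] using ih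
    | cons a ks' => simp [pvBInner, hn]

theorem pvALoop_stop (d : PySem.Dict String (List (List (String × String)))) (ks : List String)
    (n : Int) (out : List (List (String × String))) (i : Nat)
    (h : ((out.length : Int) < n && ks.any (fun a => !(d.getD a []).isEmpty)) = false) :
    ∀ fuel, pvALoop d ks n out i fuel = out := by
  intro fuel
  cases fuel with
  | zero => rw [pvALoop]
  | succ fuel => rw [pvALoop, h]; simp

theorem pvLoops_eq (d : PySem.Dict String (List (List (String × String)))) (ks : List String)
    (n : Int) (hnd : ks.Nodup) :
    pvALoop d ks n [] 0 (n * ks.length + 52).toNat =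
    pvBOuter d n ks (List.range (ks.foldl (fun m a => max m (d.getD a []).length) 0)) [] := by
  rcases eq_or_ne ks [] with rfl | hne
  · rw [pvALoop_stop _ _ _ _ _ (by simp)]
    simp [List.foldl_nil, List.range_zero, pvBOuter_nil]
  · have hM : ∀ a ∈ ks, (d.getD a []).length ≤ ks.foldl (fun m a => max m (d.getD a []).length) 0 := by
      intro a ha
      exact (PySem.List.le_foldl_max_nat ks (fun a => (d.getD a []).length) 0).2 a ha
    have hA := pvALoop_eq ks n hne hnd ((n * ks.length + 52).toNat) d [] 0
      (by omega) (by simp) (by intro _ a ha; rw [Nat.zero_mod] at ha; simp at ha)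
    rw [Nat.zero_mod] at hA
    simp only [List.drop_zero, List.take_zero, List.map_nil, List.append_nil, List.nil_append,
      List.length_nil, Nat.sub_zero] at hA
    rw [hA]
    by_cases hM0 : (ks.foldl (fun m a => max m (d.getD a []).length) 0) = 0
    · rw [hM0, List.range_zero, pvBOuter_nil]
      have : pvRR (ks.map (fun a => d.getD a [])) = [] := by
        apply pvRR_nil
        intro b hb
        rcases List.mem_map.mp hb with ⟨a, ha, rfl⟩
        have := hM a ha
        rw [hM0] at this
        simpa using List.length_eq_zero_iff.mp (by omega)
      rw [this]
      simp
    · have hMpos : 0 < ks.foldl (fun m a => max m (d.getD a []).length) 0 := by omega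
      rw [List.range_eq_range']
      rw [show (ks.foldl (fun m a => max m (d.getD a []).length) 0) =
        ((ks.foldl (fun m a => max m (d.getD a []).length) 0) - 1) + 1 by omega]
      rw [List.range'_succ, pvBOuter_cons]
      have hB := pvB_eq d ks n (ks.foldl (fun m a => max m (d.getD a []).length) 0) hM
        ((ks.foldl (fun m a => max m (d.getD a []).length) 0) * (ks.length + 1) + ks.length)
        0 [] ks [] (by simp) (by simp) hMpos
      simp only [List.map_nil, List.append_nil, List.nil_append, List.length_nil,
        Nat.sub_zero, List.drop_zero, Nat.zero_add] at hB ⊢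
      exact hB.symm


theorem pvWitness_ok : Dom_stratified_pick_py (pvWitness_stratified_pick_py.1) (pvWitness_stratified_pick_py.2.1) (pvWitness_stratified_pick_py.2.2) ∧ Pre_stratified_pick_py (pvWitness_stratified_pick_py.1) (pvWitness_stratified_pick_py.2.1) (pvWitness_stratified_pick_py.2.2) := by
  constructor <;> decide

-- ===== VERDICT (by name: the statement is the Claim_ definition above) =====
theorem stratified_pick_py_spec : Claim_equal_stratified_pick_py := by
  intro rows n key_order _hdom hpre
  unfold Spec_stratified_pick_py
  show stratified_pick_py rows n key_order = stratified_pick_py_alt rows n key_order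
  simp only [stratified_pick_py, stratified_pick_py_alt]
  rcases hpre.1 with hnd | hrows | hn
  · exact pvLoops_eq (pvBuckets rows key_order) key_order n hnd
  · subst hrows
    rw [pvALoop_stop _ _ _ _ _ (by
      have hb := pvBucketsEmptyRows key_order
      have : ∀ a ∈ key_order, ¬ ((!((pvBuckets [] key_order).getD a []).isEmpty) = true) := by
        intro a _
        simp [hb a]
      rw [List.any_eq_false.mpr this]
      simp)]
    rw [pvMaxlenEmptyRows, List.range_zero, pvBOuter_nil]
  · rw [pvALoop_stop _ _ _ _ _ (by
      have : ¬ ((0:Int) < n) := by omega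
      simp [this])]
    rw [pvBOuter_nonpos _ _ _ hn]
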